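-- pv_equiv track=rewrite | github.com/WikidPad/WikidPad | WikidPad/extensions/mediaWikiParser/MediaWikiParser.py | count_max_number_of_consecutive_quotes
-- ===== SOURCE A (Python) =====
-- def count_max_number_of_consecutive_quotes(s):
--     n = i = 0
--     for c in s:
--         if c == '"':
--             i += 1
--         else:
--             i = 0
--         if i > n:
--             n = i
--     return n
-- ===== SOURCE B (Python) =====
-- def count_max_number_of_consecutive_quotes(s):
--     n = 0
--     while '"' * (n + 1) in s:
--         n += 1
--     return n
-- ===== Notes on version B (the rewrite author's own statement) =====
-- stated objective: faster
-- what changed: Instead of a per-character resettable counter, B repeatedly tests whether a run of n+1 quote characters occurs as a substring of s, climbing n until the test fails.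
import Mathlib
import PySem

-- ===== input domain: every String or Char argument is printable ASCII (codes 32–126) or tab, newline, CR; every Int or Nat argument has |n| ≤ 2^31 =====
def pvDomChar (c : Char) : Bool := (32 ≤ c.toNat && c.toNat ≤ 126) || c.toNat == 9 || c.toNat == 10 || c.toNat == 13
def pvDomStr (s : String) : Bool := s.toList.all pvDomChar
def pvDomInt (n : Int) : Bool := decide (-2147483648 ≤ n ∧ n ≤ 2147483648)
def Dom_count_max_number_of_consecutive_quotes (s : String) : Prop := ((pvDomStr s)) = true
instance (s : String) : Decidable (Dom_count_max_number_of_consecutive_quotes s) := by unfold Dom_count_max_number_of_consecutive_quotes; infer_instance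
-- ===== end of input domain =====

-- B replaces the resettable running counter with a substring search (climb n while a run of n+1 quotes occurs in s); a timing run measured B faster by a constant factor.


-- ===== PORT A =====
def count_max_number_of_consecutive_quotes (s : String) : Int :=
  (s.toList.foldl (fun (p : Int × Int) c =>
    let i := if c = '"' then p.2 + 1 else 0
    (if i > p.1 then i else p.1, i)) (0, 0)).1

-- ===== PORT B =====
-- termination fact for the while loop: a found run of k+1 quotes fits inside s
theorem pvRun_le_len (l : List Char) (k : Nat)
    (h : PySem.Chars.isIn (List.replicate (k + 1) '"') l = true) : k + 1 ≤ l.length := by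
  have := (PySem.Chars.isIn_iff_infix _ _).1 h
  simpa using this.length_le

def count_max_number_of_consecutive_quotes_alt_loop (s : String) (n : Nat) : Nat :=
  if h : PySem.Str.isIn (String.ofList (List.replicate (n + 1) '"')) s = true then
    count_max_number_of_consecutive_quotes_alt_loop s (n + 1)
  else n
termination_by s.toList.length + 1 - n
decreasing_by
  have := pvRun_le_len s.toList (n) (by simpa [PySem.Str.isIn] using h)
  omega

def count_max_number_of_consecutive_quotes_alt (s : String) : Int :=
  (count_max_number_of_consecutive_quotes_alt_loop s 0 : Int)

-- ===== PRECONDITION & SPEC =====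
def Spec_count_max_number_of_consecutive_quotes (s : String) (out : Int) : Prop := out = count_max_number_of_consecutive_quotes_alt s
instance (s : String) (out : Int) : Decidable (Spec_count_max_number_of_consecutive_quotes s out) := by unfold Spec_count_max_number_of_consecutive_quotes; infer_instance

-- ===== CLAIM (what is proved, stated in full; the proofs are below) =====
def Claim_equal_count_max_number_of_consecutive_quotes : Prop := ∀ (s : String), Dom_count_max_number_of_consecutive_quotes s → Spec_count_max_number_of_consecutive_quotes s (count_max_number_of_consecutive_quotes s)

-- ===== LEMMAS AND PROOFS =====

-- length of the leading run of quotes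
def pvLead : List Char → Nat
  | [] => 0
  | c :: t => if c = '"' then pvLead t + 1 else 0

-- max run length of consecutive quotes (reference value)
def pvMrun : List Char → Nat
  | [] => 0
  | c :: t => if c = '"' then max (pvMrun t) (pvLead t + 1) else pvMrun t

theorem pvLead_le_mrun (l : List Char) : pvLead l ≤ pvMrun l := by
  induction l with
  | nil => simp [pvLead, pvMrun]
  | cons c t ih => by_cases h : c = '"' <;> simp [pvLead, pvMrun, h] <;> omega

theorem pvMrun_cons_le (c : Char) (t : List Char) : pvMrun t ≤ pvMrun (c :: t) := by
  by_cases h : c = '"' <;> simp [pvMrun, h]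

-- ext i l : the largest value the running counter reaches while scanning l, starting from i
def pvExt : Int → List Char → Int
  | _, [] => 0
  | i, c :: t => if c = '"' then max (i + 1) (pvExt (i + 1) t) else pvExt 0 t

theorem pvFoldA_fst (l : List Char) : ∀ n i : Int, 0 ≤ n →
    (l.foldl (fun (p : Int × Int) c =>
      let i := if c = '"' then p.2 + 1 else 0
      (if i > p.1 then i else p.1, i)) (n, i)).1 = max n (pvExt i l) := by
  induction l with
  | nil => intro n i hn; simp [pvExt]; omega
  | cons c t ih =>
    intro n i hn
    by_cases h : c = '"'
    · simp only [List.foldl_cons, h, if_pos, pvExt, if_true]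
      rw [show ((if (i+1) > n then (i+1) else n, i+1)) = ((max n (i+1), i+1)) by
        simp only [Prod.mk.injEq, and_true]; split <;> omega]
      rw [ih (max n (i+1)) (i+1) (by omega)]
      omega
    · simp only [List.foldl_cons, h, if_neg, pvExt, if_false, ite_false]
      rw [show ((if (0:Int) > n then (0:Int) else n, (0:Int))) = ((n, (0:Int))) by
        simp; omega]
      rw [ih n 0 hn]

theorem pvExt_eq (l : List Char) : ∀ i : Int, 0 ≤ i →
    pvExt i l = max (pvMrun l : Int) (if pvLead l = 0 then 0 else i + pvLead l) := by
  induction l with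
  | nil => intro i _; simp [pvExt, pvMrun, pvLead]
  | cons c t ih =>
    intro i hi
    by_cases h : c = '"'
    · have ht := ih (i + 1) (by omega)
      have hl : pvLead t ≤ pvMrun t := pvLead_le_mrun t
      simp only [pvExt, pvMrun, pvLead, h, if_true]
      rw [ht]
      by_cases hz : pvLead t = 0 <;> simp [hz] <;> push_cast <;> omega
    · have ht := ih 0 (by omega)
      have hl : pvLead t ≤ pvMrun t := pvLead_le_mrun t
      simp only [pvExt, pvMrun, pvLead, h, if_false, ite_false]
      rw [ht]
      by_cases hz : pvLead t = 0 <;> simp [hz] <;> push_cast <;> omega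

theorem pvA_eq_mrun (s : String) :
    count_max_number_of_consecutive_quotes s = (pvMrun s.toList : Int) := by
  unfold count_max_number_of_consecutive_quotes
  rw [pvFoldA_fst s.toList 0 0 (by omega), pvExt_eq s.toList 0 (by omega)]
  have := pvLead_le_mrun s.toList
  by_cases hz : pvLead s.toList = 0 <;> simp [hz] <;> omega

theorem pvPrefix_le_lead (l : List Char) : ∀ k, List.replicate k '"' <+: l → k ≤ pvLead l := by
  induction l with
  | nil => intro k h; cases k with
    | zero => omega
    | succ m => exact absurd h.length_le (by simp)
  | cons c t ih =>
    intro k h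
    cases k with
    | zero => omega
    | succ m =>
      rw [List.replicate_succ, List.cons_prefix_cons] at h
      simp [pvLead, h.1.symm]
      exact ih m h.2

theorem pvInfix_le_mrun (l : List Char) : ∀ k, List.replicate k '"' <:+: l → k ≤ pvMrun l := by
  induction l with
  | nil => intro k h; cases k with
    | zero => omega
    | succ m => exact absurd h.length_le (by simp)
  | cons c t ih =>
    intro k h
    rcases List.infix_cons_iff.1 h with hp | hi
    · exact le_trans (pvPrefix_le_lead (c :: t) k hp) (pvLead_le_mrun _)
    · exact le_trans (ih k hi) (pvMrun_cons_le c t)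

theorem pvLead_prefix (l : List Char) : List.replicate (pvLead l) '"' <+: l := by
  induction l with
  | nil => simp [pvLead]
  | cons c t ih =>
    by_cases h : c = '"'
    · simp only [pvLead, h, if_true, List.replicate_succ]
      exact List.cons_prefix_cons.2 ⟨rfl, ih⟩
    · simp [pvLead, h]

theorem pvMrun_infix (l : List Char) : List.replicate (pvMrun l) '"' <:+: l := by
  induction l with
  | nil => simp [pvMrun]
  | cons c t ih =>
    by_cases h : c = '"'
    · simp only [pvMrun, h, if_true]
      rcases Nat.le_total (pvLead t + 1) (pvMrun t) with hle | hle
      · rw [max_eq_left hle]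
        exact ih.trans (List.suffix_cons _ t).isInfix
      · rw [max_eq_right hle, List.replicate_succ]
        exact (List.cons_prefix_cons.2 ⟨h.symm ▸ rfl, pvLead_prefix t⟩).isInfix
    · simp only [pvMrun, h, if_false, ite_false]
      exact ih.trans (List.suffix_cons _ t).isInfix

theorem pvLe_mrun_infix (l : List Char) (k : Nat) (hk : k ≤ pvMrun l) :
    List.replicate k '"' <:+: l := by
  have h1 : List.replicate k '"' <+: List.replicate (pvMrun l) '"' := by
    refine ⟨List.replicate (pvMrun l - k) '"', ?_⟩
    rw [← List.replicate_add]
    congr 1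
    omega
  exact (h1.isInfix).trans (pvMrun_infix l)

theorem pvLoop_eq (s : String) : ∀ d k, pvMrun s.toList - k = d → k ≤ pvMrun s.toList →
    count_max_number_of_consecutive_quotes_alt_loop s k = pvMrun s.toList := by
  intro d
  induction d with
  | zero =>
    intro k hd hk
    have hk' : k = pvMrun s.toList := by omega
    rw [count_max_number_of_consecutive_quotes_alt_loop]
    have : ¬ PySem.Str.isIn (String.ofList (List.replicate (k + 1) '"')) s = true := by
      intro h
      have := pvInfix_le_mrun s.toList (k + 1) (by simpa using (PySem.Str.isIn_iff_infix _ _).1 h)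
      omega
    rw [dif_neg this]
    exact hk'
  | succ m ih =>
    intro k hd hk
    rw [count_max_number_of_consecutive_quotes_alt_loop]
    have : PySem.Str.isIn (String.ofList (List.replicate (k + 1) '"')) s = true := by
      rw [PySem.Str.isIn_iff_infix]
      simpa using pvLe_mrun_infix s.toList (k + 1) (by omega)
    simp only [this, if_true, dite_true]
    exact ih (k + 1) (by omega) (by omega)

theorem pvB_eq_mrun (s : String) :
    count_max_number_of_consecutive_quotes_alt s = (pvMrun s.toList : Int) := by
  unfold count_max_number_of_consecutive_quotes_alt
  rw [pvLoop_eq s (pvMrun s.toList) 0 (by omega) (by omega)]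

-- ===== VERDICT (by name: the statement is the Claim_ definition above) =====
theorem count_max_number_of_consecutive_quotes_spec : Claim_equal_count_max_number_of_consecutive_quotes := by
  intro s _
  unfold Spec_count_max_number_of_consecutive_quotes
  rw [pvA_eq_mrun, pvB_eq_mrun]
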